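-- pv_equiv track=rewrite | github.com/lohiya-saurabh/DSA | DSA-1/October_Fest_23/MaxSumAfterKSwaps.py | maxSumAfterKSwaps
-- ===== SOURCE A (Python) =====
-- def maxSumAfterKSwaps(A, B, K):
--     newArr = [[A[i], B[i], A[i] - B[i]] for i in range(len(A))]
--     newArr.sort(key= lambda x: x[2], reverse=True)
--     maxSum = sum(A)
--     K = K %(len(A) + 1)
--     i = 0
--     while i < K and newArr[-1][2] < 0:
--         maxSum += newArr[-1][2]* (-1)
--         newArr.pop()
--         i += 1
--     return maxSum
-- ===== SOURCE B (Python) =====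
-- def maxSumAfterKSwaps(A, B, K):
--     # Quickselect: partition around a pivot instead of sorting; sum the K
--     # smallest negative differences directly.
--     k = K % (len(A) + 1)
--     negs = [a - b for a, b in zip(A, B) if a - b < 0]
--     if k >= len(negs):
--         return sum(A) - sum(negs)
--     total = 0
--     lst = negs
--     while k > 0:
--         p = lst[len(lst) // 2]
--         lo = [x for x in lst if x < p]
--         eq = [x for x in lst if x == p]
--         if k <= len(lo):
--             lst = lo
--         elif k <= len(lo) + len(eq):
--             total += sum(lo) + (k - len(lo)) * p
--             k = 0
--         else:
--             total += sum(lo) + len(eq) * p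
--             k -= len(lo) + len(eq)
--             lst = [x for x in lst if x > p]
--     return sum(A) - total
-- ===== Notes on version B (the rewrite author's own statement) =====
-- stated objective: faster
-- what changed: B replaces the full reverse sort of (a,b,a-b) triples and the pop-from-the-end loop by a quickselect: it collects the negative differences a-b in one pass and then repeatedly three-way partitions them around a middle pivot, summing the K smallest without ever sorting.
-- outside the precondition, e.g. on maxSumAfterKSwaps([1, 2], [0], 1): A raises IndexError, B returns 3
import Mathlib
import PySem

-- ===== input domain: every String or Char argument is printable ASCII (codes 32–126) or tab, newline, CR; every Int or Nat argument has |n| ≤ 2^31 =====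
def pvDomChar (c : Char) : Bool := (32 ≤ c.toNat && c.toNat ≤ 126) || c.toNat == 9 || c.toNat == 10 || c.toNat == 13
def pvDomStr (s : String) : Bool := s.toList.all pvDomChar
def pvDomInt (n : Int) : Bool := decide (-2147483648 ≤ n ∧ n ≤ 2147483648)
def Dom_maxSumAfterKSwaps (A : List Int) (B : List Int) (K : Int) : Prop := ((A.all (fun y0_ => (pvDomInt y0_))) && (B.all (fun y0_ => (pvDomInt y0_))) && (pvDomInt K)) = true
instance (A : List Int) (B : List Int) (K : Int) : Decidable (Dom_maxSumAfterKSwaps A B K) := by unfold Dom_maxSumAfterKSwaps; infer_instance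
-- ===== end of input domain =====

-- B replaces the full reverse sort of (a,b,a-b) triples and the pop loop by a quickselect:
-- it partitions the negative differences around a pivot and sums the K smallest directly.


-- ===== PORT A =====
-- the 'while i < K and newArr[-1][2] < 0: maxSum += newArr[-1][2]*(-1); newArr.pop(); i += 1' loop;
-- the 'none' branch is Python's IndexError on newArr[-1], unreachable here since K ≤ len(newArr)
def pvALoop (newArr : List (Int × Int × Int)) (maxSum i K : Int) : Int :=
  if i < K then
    match h : newArr.getLast? with
    | some last =>
      if last.2.2 < 0 then
        pvALoop newArr.dropLast (maxSum + last.2.2 * (-1)) (i + 1) K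
      else maxSum
    | none => maxSum
  else maxSum
termination_by newArr.length
decreasing_by
  have hne : newArr ≠ [] := by intro e; subst e; simp at h
  have := List.length_pos_of_ne_nil hne
  simp [List.length_dropLast]; omega

def maxSumAfterKSwaps (A : List Int) (B : List Int) (K : Int) : Int :=
  -- newArr = [[A[i], B[i], A[i]-B[i]] for i in range(len(A))]; A[i]/B[i] are in range under Pre_
  let newArr : List (Int × Int × Int) :=
    (List.range A.length).map (fun i : Nat =>
      (PySem.List.pyGetD A (i : Int) 0, PySem.List.pyGetD B (i : Int) 0,
       PySem.List.pyGetD A (i : Int) 0 - PySem.List.pyGetD B (i : Int) 0))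
  let sortedArr := PySem.List.sorted newArr (fun x => x.2.2) true
  let maxSum := A.sum
  let K' := PySem.Int.mod K ((A.length : Int) + 1)
  pvALoop sortedArr maxSum 0 K'

-- ===== PORT B =====
-- helpers cited by pvBLoop's decreasing_by (termination of the quickselect loop)
lemma pv_filter_attach_unattach (lst : List Int) (q : Int → Bool) :
    (List.filter (fun x : {x // x ∈ lst} => q ↑x) lst.attach).unattach = lst.filter q := by
  rw [List.filter_attach (p := q), List.unattach, List.map_map]
  refine (List.map_congr_left (fun a _ => rfl)).trans (List.attach_map_subtype_val _)

lemma pv_length_filter_lt (lst : List Int) (q : Int → Bool) (p : Int) (hp : p ∈ lst)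
    (hq : q p = false) : (lst.filter q).length < lst.length :=
  List.length_filter_lt_length_iff_exists.mpr ⟨p, hp, by simp [hq]⟩

-- the 'while k > 0' quickselect loop of Source B; the 'none' branch is Python's
-- IndexError on lst[len(lst)//2], unreachable since the loop keeps 1 ≤ k ≤ len(lst)
def pvBLoop (lst : List Int) (total k : Int) : Int :=
  if 0 < k then
    match hp : PySem.List.pyGet? lst (PySem.Int.floordiv (lst.length : Int) 2) with
    | none => total
    | some p =>
      let lo := lst.filter (fun x => decide (x < p))
      let eq := lst.filter (fun x => decide (x = p))
      if k ≤ (lo.length : Int) then pvBLoop lo total k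
      else if k ≤ (lo.length : Int) + (eq.length : Int) then
        total + lo.sum + (k - (lo.length : Int)) * p
      else
        pvBLoop (lst.filter (fun x => decide (p < x)))
          (total + lo.sum + (eq.length : Int) * p) (k - (lo.length : Int) - (eq.length : Int))
  else total
termination_by lst.length
decreasing_by
  · have hmem : p ∈ lst := PySem.List.mem_of_pyGet?_eq_some _ hp
    rw [pv_filter_attach_unattach lst (fun x => decide (x < p))]
    exact pv_length_filter_lt lst _ p hmem (by simp)
  · have hmem : p ∈ lst := PySem.List.mem_of_pyGet?_eq_some _ hp
    rw [pv_filter_attach_unattach lst (fun x => decide (p < x))]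
    exact pv_length_filter_lt lst _ p hmem (by simp)

def maxSumAfterKSwaps_alt (A : List Int) (B : List Int) (K : Int) : Int :=
  let k := PySem.Int.mod K ((A.length : Int) + 1)
  let negs := ((A.zip B).map (fun p => p.1 - p.2)).filter (fun d => decide (d < 0))
  if (negs.length : Int) ≤ k then A.sum - negs.sum
  else A.sum - pvBLoop negs 0 k

-- ===== PRECONDITION & SPEC =====
-- A raises IndexError on B[i] when len(B) < len(A); those inputs are excluded.
def Pre_maxSumAfterKSwaps (A : List Int) (B : List Int) (K : Int) : Prop :=
  A.length ≤ B.length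
instance (A : List Int) (B : List Int) (K : Int) : Decidable (Pre_maxSumAfterKSwaps A B K) := by
  unfold Pre_maxSumAfterKSwaps; infer_instance
def pvWitness_maxSumAfterKSwaps : List Int × List Int × Int := ([1, 5], [3, 2], 1)

def Spec_maxSumAfterKSwaps (A : List Int) (B : List Int) (K : Int) (out : Int) : Prop := out = maxSumAfterKSwaps_alt A B K
instance (A : List Int) (B : List Int) (K : Int) (out : Int) : Decidable (Spec_maxSumAfterKSwaps A B K out) := by unfold Spec_maxSumAfterKSwaps; infer_instance

-- ===== CLAIM (what is proved, stated in full; the proofs are below) =====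
def Claim_equal_maxSumAfterKSwaps : Prop := ∀ (A : List Int) (B : List Int) (K : Int), Dom_maxSumAfterKSwaps A B K → Pre_maxSumAfterKSwaps A B K → Spec_maxSumAfterKSwaps A B K (maxSumAfterKSwaps A B K)

-- ===== LEMMAS AND PROOFS =====

-- A's loop, read from the reversed array: it subtracts the first (K-i) elements of
-- the leading negative run of the diff sequence.
lemma pvALoop_reverse (r : List (Int × Int × Int)) :
    ∀ (m i K : Int), pvALoop r.reverse m i K =
      m - ((((r.map (fun x => x.2.2)).takeWhile (fun d => decide (d < 0))).take (K - i).toNat).sum) := by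
  induction r with
  | nil =>
    intro m i K
    rw [pvALoop]
    simp
  | cons x t ih =>
    intro m i K
    rw [pvALoop]
    by_cases hiK : i < K
    · simp only [hiK, if_true, List.reverse_cons]
      split
      · rename_i last h
        rw [List.reverse_cons, List.getLast?_concat] at h
        simp only [Option.some.injEq] at h
        subst h
        by_cases hneg : x.2.2 < 0
        · simp only [hneg, if_true, List.dropLast_concat]
          rw [ih]
          simp only [List.map_cons, List.takeWhile_cons, hneg, decide_true, if_true]
          have htk : (K - i).toNat = (K - (i + 1)).toNat + 1 := by omega
          have h2 : K - (i + 1) = -1 + K - i := by ring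
          rw [htk, h2, List.take_succ_cons, List.sum_cons]
          ring
        · simp only [hneg, if_false]
          simp [hneg]
      · rename_i h
        rw [List.reverse_cons, List.getLast?_concat] at h
        cases h
    · simp only [hiK, if_false]
      have : (K - i).toNat = 0 := by omega
      simp [this]

-- on a nondecreasing list, the leading negative run is all the negatives
lemma takeWhile_neg_eq_filter_of_pairwise (l : List Int) (h : l.Pairwise (· ≤ ·)) :
    l.takeWhile (fun d => decide (d < 0)) = l.filter (fun d => decide (d < 0)) := by
  induction l with
  | nil => rfl
  | cons x t ih =>
    rcases List.pairwise_cons.mp h with ⟨hx, ht⟩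
    by_cases hneg : x < 0
    · simp [hneg, ih ht]
    · have : t.filter (fun d => decide (d < 0)) = [] := by
        rw [List.filter_eq_nil_iff]
        intro a ha
        have := hx a ha
        simp; omega
      simp [hneg, this]

-- under Pre_, A's newArr is the zipped triple list
lemma newArr_eq (A B : List Int) (hAB : A.length ≤ B.length) :
    (List.range A.length).map (fun i : Nat =>
      (PySem.List.pyGetD A (i : Int) 0, PySem.List.pyGetD B (i : Int) 0,
       PySem.List.pyGetD A (i : Int) 0 - PySem.List.pyGetD B (i : Int) 0)) =
    (A.zip B).map (fun p => (p.1, p.2, p.1 - p.2)) := by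
  apply List.ext_getElem
  · simp [List.length_zip]; omega
  · intro i h1 h2
    have hiA : i < A.length := by simpa using h1
    have hiB : i < B.length := by omega
    simp only [List.getElem_map, List.getElem_range, List.getElem_zip]
    rw [PySem.List.pyGetD_natCast A i 0, PySem.List.pyGetD_natCast B i 0,
      List.getD_eq_getElem A 0 hiA, List.getD_eq_getElem B 0 hiB]

-- A's port computes sum(A) minus the sum of the k smallest negative differences
lemma portA_eq (A B : List Int) (K : Int) (hPre : A.length ≤ B.length) :
    maxSumAfterKSwaps A B K =
      A.sum - ((PySem.List.sorted
          (((A.zip B).map (fun p => p.1 - p.2)).filter (fun d => decide (d < 0)))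
          (fun x => x) false).take (PySem.Int.mod K ((A.length : Int) + 1)).toNat).sum := by
  unfold maxSumAfterKSwaps
  rw [newArr_eq A B hPre]
  set triples := (A.zip B).map (fun p : Int × Int => (p.1, p.2, p.1 - p.2)) with htr
  set s := PySem.List.sorted triples (fun x => x.2.2) true with hs
  set k := PySem.Int.mod K ((A.length : Int) + 1) with hk
  have hrev : s.reverse.reverse = s := by simp
  have := pvALoop_reverse s.reverse A.sum 0 k
  rw [hrev] at this
  rw [this]
  have hpw : (s.reverse.map (fun x : Int × Int × Int => x.2.2)).Pairwise (· ≤ ·) := by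
    rw [List.map_reverse, List.pairwise_reverse]
    exact (PySem.List.sorted_pairwise_rev triples (fun x => x.2.2)).map _ (fun _ _ h => h)
  have hperm : (s.reverse.map (fun x : Int × Int × Int => x.2.2)).Perm
      ((A.zip B).map (fun p : Int × Int => p.1 - p.2)) := by
    have h1 : (s.reverse).Perm triples :=
      (List.reverse_perm s).trans (PySem.List.sorted_perm triples (fun x => x.2.2) true)
    have h2 := h1.map (fun x : Int × Int × Int => x.2.2)
    rw [htr] at h2
    simpa [Function.comp] using h2
  have hnegs : PySem.List.sorted
      (((A.zip B).map (fun p : Int × Int => p.1 - p.2)).filter (fun d => decide (d < 0)))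
      (fun x => x) false
      = (s.reverse.map (fun x : Int × Int × Int => x.2.2)).filter (fun d => decide (d < 0)) := by
    apply PySem.List.sorted_id_eq_of_perm_of_pairwise
    · exact hperm.filter _
    · exact hpw.filter _
  rw [hnegs, takeWhile_neg_eq_filter_of_pairwise _ hpw]
  simp


-- a list all of whose elements equal p sums to length * p
lemma sum_of_all_eq (l : List Int) (p : Int) (h : ∀ x ∈ l, x = p) :
    l.sum = (l.length : Int) * p := by
  induction l with
  | nil => simp
  | cons x t ih =>
    have hx := h x (by simp)
    have ht := ih (fun y hy => h y (by simp [hy]))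
    simp [hx, ht]; ring

lemma count_filter_int (l : List Int) (q : Int → Bool) (a : Int) :
    (l.filter q).count a = if q a then l.count a else 0 := by
  induction l with
  | nil => simp
  | cons x t ih =>
    by_cases hx : q x <;> by_cases hxa : x = a <;>
      subst_eqs <;> simp_all [List.count_cons]

-- the three-way partition is a permutation of the list
lemma partition3_perm (lst : List Int) (p : Int) :
    (lst.filter (fun x => decide (x < p)) ++ lst.filter (fun x => decide (x = p)) ++
      lst.filter (fun x => decide (p < x))).Perm lst := by
  apply List.perm_iff_count.mpr
  intro a
  simp only [List.count_append, count_filter_int]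
  rcases lt_trichotomy a p with h | h | h
  · have h2 : ¬ a = p := by omega
    have h3 : ¬ p < a := by omega
    simp [h, h2, h3]
  · have h1 : ¬ a < p := by omega
    have h3 : ¬ p < a := by omega
    simp [h, h1, h3]
  · have h1 : ¬ a < p := by omega
    have h2 : ¬ a = p := by omega
    simp [h, h1, h2]

-- elements all equal to p are pairwise nondecreasing
lemma pairwise_le_of_all_eq (l : List Int) (p : Int) (h : ∀ x ∈ l, x = p) :
    l.Pairwise (· ≤ ·) :=
  List.pairwise_of_forall_mem_list (fun a ha b hb => by rw [h a ha, h b hb])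

-- sorted lst splits as sorted lo ++ eq ++ sorted hi around any pivot p
lemma sorted_partition3 (lst : List Int) (p : Int) :
    PySem.List.sorted lst (fun x => x) false =
      PySem.List.sorted (lst.filter (fun x => decide (x < p))) (fun x => x) false ++
      lst.filter (fun x => decide (x = p)) ++
      PySem.List.sorted (lst.filter (fun x => decide (p < x))) (fun x => x) false := by
  have hlo : ∀ x ∈ PySem.List.sorted (lst.filter (fun x => decide (x < p))) (fun x => x) false,
      x < p := by
    intro x hx
    have := (PySem.List.mem_sorted _ _ _ _).mp hx
    have := List.of_mem_filter this
    simpa using this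
  have heq : ∀ x ∈ lst.filter (fun x => decide (x = p)), x = p := by
    intro x hx
    have := List.of_mem_filter hx
    simpa using this
  have hhi : ∀ x ∈ PySem.List.sorted (lst.filter (fun x => decide (p < x))) (fun x => x) false,
      p < x := by
    intro x hx
    have := (PySem.List.mem_sorted _ _ _ _).mp hx
    have := List.of_mem_filter this
    simpa using this
  apply PySem.List.sorted_id_eq_of_perm_of_pairwise
  · refine List.Perm.trans ?_ (partition3_perm lst p)
    exact List.Perm.append
      (List.Perm.append (PySem.List.sorted_perm _ _ _) (List.Perm.refl _))
      (PySem.List.sorted_perm _ _ _)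
  · apply List.pairwise_append.mpr
    refine ⟨?_, PySem.List.sorted_pairwise _ _, ?_⟩
    · apply List.pairwise_append.mpr
      refine ⟨PySem.List.sorted_pairwise _ _, pairwise_le_of_all_eq _ p heq, ?_⟩
      intro a ha b hb
      have := hlo a ha
      have := heq b hb
      omega
    · intro a ha b hb
      have hb' := hhi b hb
      rcases List.mem_append.mp ha with h | h
      · have := hlo a h; omega
      · have := heq a h; omega

-- take-sum of a three-block concatenation, cut inside the middle constant block
lemma take_concat3_sum_mid (slo eq shi : List Int) (kn : Nat) (p : Int)
    (hlo : slo.length ≤ kn) (hmid : kn ≤ slo.length + eq.length)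
    (heqm : ∀ x ∈ eq, x = p) :
    ((slo ++ eq ++ shi).take kn).sum = slo.sum + ((kn - slo.length : Nat) : Int) * p := by
  rw [List.append_assoc, List.take_append, List.take_of_length_le hlo, List.take_append]
  have h0 : kn - slo.length - eq.length = 0 := by omega
  rw [h0, List.take_zero, List.append_nil, List.sum_append,
    sum_of_all_eq _ p (fun x hx => heqm x (List.mem_of_mem_take hx)), List.length_take]
  have hmin : min (kn - slo.length) eq.length = kn - slo.length := by omega
  rw [hmin]

-- take-sum of a three-block concatenation, cut inside the last block
lemma take_concat3_sum_right (slo eq shi : List Int) (kn : Nat) (p : Int)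
    (hge : slo.length + eq.length ≤ kn) (heqm : ∀ x ∈ eq, x = p) :
    ((slo ++ eq ++ shi).take kn).sum =
      slo.sum + (eq.length : Int) * p + (shi.take (kn - slo.length - eq.length)).sum := by
  rw [List.append_assoc, List.take_append, List.take_of_length_le (by omega), List.take_append,
    List.take_of_length_le (by omega : eq.length ≤ kn - slo.length), List.sum_append,
    List.sum_append, sum_of_all_eq eq p heqm]
  ring

-- the quickselect loop returns total plus the sum of the k smallest elements
lemma pvBLoop_eq (n : Nat) : ∀ (lst : List Int) (total k : Int),
    lst.length ≤ n → 1 ≤ k → k ≤ (lst.length : Int) →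
    pvBLoop lst total k =
      total + ((PySem.List.sorted lst (fun x => x) false).take k.toNat).sum := by
  induction n with
  | zero =>
    intro lst total k hn h1 h2
    exfalso
    have : lst.length = 0 := by omega
    rw [this] at h2
    omega
  | succ n ih =>
    intro lst total k hn h1 h2
    have hlen : 0 < lst.length := by
      by_contra h
      have : lst.length = 0 := by omega
      rw [this] at h2; omega
    have hidx : PySem.Int.floordiv (lst.length : Int) 2 = ((lst.length / 2 : Nat) : Int) := by
      exact_mod_cast PySem.Int.floordiv_natCast lst.length 2
    have hget : PySem.List.pyGet? lst (PySem.Int.floordiv (lst.length : Int) 2) =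
        some lst[lst.length / 2] := by
      rw [hidx, PySem.List.pyGet?_natCast]
      exact List.getElem?_eq_getElem (by omega)
    rw [pvBLoop]
    have h0k : 0 < k := by omega
    simp only [h0k, if_true]
    split
    · rename_i hnone
      rw [hget] at hnone; cases hnone
    rename_i p hsome
    rw [hget] at hsome
    have hpdef : p = lst[lst.length / 2] := by simpa using hsome.symm
    have hsplit := sorted_partition3 lst p
    have hlens : (lst.filter (fun x => decide (x < p))).length +
        (lst.filter (fun x => decide (x = p))).length +
        (lst.filter (fun x => decide (p < x))).length = lst.length := by
      have h := (partition3_perm lst p).length_eq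
      simp only [List.length_append] at h
      omega
    have heqmem : ∀ x ∈ lst.filter (fun x => decide (x = p)), x = p := by
      intro x hx
      have := List.of_mem_filter hx
      simpa using this
    have hpmem : p ∈ lst := by rw [hpdef]; exact List.getElem_mem _
    have heqlen : 0 < (lst.filter (fun x => decide (x = p))).length :=
      List.length_pos_of_mem (List.mem_filter.mpr ⟨hpmem, by simp⟩)
    have hsl : (PySem.List.sorted (lst.filter (fun x => decide (x < p))) (fun x => x) false).length
        = (lst.filter (fun x => decide (x < p))).length := PySem.List.length_sorted _ _ _
    have hlosum : (PySem.List.sorted (lst.filter (fun x => decide (x < p))) (fun x => x) false).sum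
        = (lst.filter (fun x => decide (x < p))).sum := (PySem.List.sorted_perm _ _ _).sum_eq
    by_cases hb1 : k ≤ ((lst.filter (fun x => decide (x < p))).length : Int)
    · simp only [hb1, if_true]
      rw [ih _ total k (by omega) h1 (by omega), hsplit, List.append_assoc,
        List.take_append_of_le_length (by omega)]
    · simp only [hb1, if_false]
      by_cases hb2 : k ≤ ((lst.filter (fun x => decide (x < p))).length : Int) +
          ((lst.filter (fun x => decide (x = p))).length : Int)
      · simp only [hb2, if_true]
        have hm := take_concat3_sum_mid
          (PySem.List.sorted (lst.filter (fun x => decide (x < p))) (fun x => x) false)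
          (lst.filter (fun x => decide (x = p)))
          (PySem.List.sorted (lst.filter (fun x => decide (p < x))) (fun x => x) false)
          k.toNat p (by omega) (by omega) heqmem
        rw [hsplit, hm, hlosum]
        have hc : ((k.toNat -
            (PySem.List.sorted (lst.filter (fun x => decide (x < p))) (fun x => x) false).length
            : Nat) : Int) = k - ((lst.filter (fun x => decide (x < p))).length : Int) := by
          omega
        rw [hc]
        ring
      · simp only [hb2, if_false]
        have hrec := ih (lst.filter (fun x => decide (p < x)))
          (total + (lst.filter (fun x => decide (x < p))).sum +
            ((lst.filter (fun x => decide (x = p))).length : Int) * p)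
          (k - ((lst.filter (fun x => decide (x < p))).length : Int) -
            ((lst.filter (fun x => decide (x = p))).length : Int))
          (by omega) (by omega) (by omega)
        have hm := take_concat3_sum_right
          (PySem.List.sorted (lst.filter (fun x => decide (x < p))) (fun x => x) false)
          (lst.filter (fun x => decide (x = p)))
          (PySem.List.sorted (lst.filter (fun x => decide (p < x))) (fun x => x) false)
          k.toNat p (by omega) heqmem
        rw [hrec, hsplit, hm, hlosum]
        have hc : (k - ((lst.filter (fun x => decide (x < p))).length : Int) -
            ((lst.filter (fun x => decide (x = p))).length : Int)).toNat =
            k.toNat -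
            (PySem.List.sorted (lst.filter (fun x => decide (x < p))) (fun x => x) false).length -
            (lst.filter (fun x => decide (x = p))).length := by
          omega
        rw [hc]
        ring

-- Python's K % (len(A)+1) lies in [0, len(A)]
lemma pymod_bounds (K : Int) (m : Nat) :
    0 ≤ PySem.Int.mod K ((m : Int) + 1) ∧ PySem.Int.mod K ((m : Int) + 1) ≤ (m : Int) := by
  have hpos : (0 : Int) < (m : Int) + 1 := by omega
  rw [PySem.Int.mod_eq_emod_of_pos hpos]
  have h1 := Int.emod_nonneg K (by omega : ((m : Int) + 1) ≠ 0)
  have h2 := Int.emod_lt_of_pos K hpos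
  omega

-- ===== VERDICT (by name: the statement is the Claim_ definition above) =====
theorem maxSumAfterKSwaps_spec : Claim_equal_maxSumAfterKSwaps := by
  intro A B K _ hPre
  unfold Spec_maxSumAfterKSwaps
  rw [portA_eq A B K hPre]
  unfold maxSumAfterKSwaps_alt
  simp only []
  set k := PySem.Int.mod K ((A.length : Int) + 1) with hk
  set negs := ((A.zip B).map (fun p => p.1 - p.2)).filter (fun d => decide (d < 0)) with hnegs
  obtain ⟨hk0, hkle⟩ := pymod_bounds K A.length
  rw [← hk] at hk0 hkle
  have hslen : (PySem.List.sorted negs (fun x => x) false).length = negs.length :=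
    PySem.List.length_sorted _ _ _
  by_cases hcase : (negs.length : Int) ≤ k
  · simp only [hcase, if_true]
    rw [List.take_of_length_le (by rw [hslen]; omega),
      (PySem.List.sorted_perm negs (fun x => x) false).sum_eq]
  · simp only [hcase, if_false]
    by_cases hk1 : 1 ≤ k
    · rw [pvBLoop_eq negs.length negs 0 k (le_refl _) hk1 (by omega)]
      ring
    · have hkz : k = 0 := by omega
      rw [hkz, pvBLoop]
      simp
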